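-- pv_equiv track=rewrite | github.com/rizqikapratamaa/Tucil1_13522126 | src/tes.py | breach_protocol
-- ===== SOURCE A (Python) =====
-- def breach_protocol(matrix, sequences, buffer_size):
--     rewards = {tuple(seq): weight for seq, weight in sequences}
--     best_path, best_reward = [], 0
--
--     # generate all possible paths
--     paths = generate_paths(matrix, buffer_size)
--
--     for path in paths:
--         buffer = [matrix[x][y] for x, y in path]
--         total_reward = 0
--         seq_coords = []  # track the coordinates of the sequences found
--         used_coords = set()  # track the coordinates that have been used
--
--         # check if any sequence in the buffer
--         for seq, weight in rewards.items():
--             for i in range(len(buffer) - len(seq) + 1):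
--                 if tuple(buffer[i:i+len(seq)]) == seq and all(coord not in used_coords for coord in path[i:i+len(seq)]):
--                     total_reward += weight
--                     seq_coords.extend(path[i:i+len(seq)])
--                     used_coords.update(path[i:i+len(seq)])
--
--         if total_reward > best_reward:
--             best_path, best_reward = seq_coords, total_reward
--
--     return best_path, best_reward
--
-- def generate_paths(matrix, buffer_size):
--     paths = []
--     for x in range(len(matrix)):
--         for y in range(len(matrix[0])):
--             # generate all possible paths starting from (x, y)
--             paths.extend(generate_paths_from(matrix, buffer_size, x, y, set([(x, y)])))
--     return paths
--
-- def generate_paths_from(matrix, buffer_size, x, y, visited):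
--     if buffer_size == 1:
--         return [[(x, y)]]
--
--     paths = []
--     for dx, dy in [(0, 1), (1, 0), (0, -1), (-1, 0)]:  # right, down, left, up
--         nx, ny = x + dx, y + dy
--         if 0 <= nx < len(matrix) and 0 <= ny < len(matrix[0]) and (nx, ny) not in visited:
--             for path in generate_paths_from(matrix, buffer_size - 1, nx, ny, visited | {(nx, ny)}):
--                 paths.append([(x, y)] + path)
--     return paths
-- ===== SOURCE B (Python) =====
-- def breach_protocol(matrix, sequences, buffer_size):
--     rows = len(matrix)
--     cols = len(matrix[0]) if matrix else 0
--     rewards = {}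
--     for seq, weight in sequences:
--         rewards[tuple(seq)] = weight
--     best_path, best_reward = [], 0
--     for x in range(rows):
--         for y in range(cols):
--             # iterative DFS with an explicit stack, replacing the recursive generator;
--             # neighbours are pushed in reverse direction order so pop order matches
--             stack = [([(x, y)], {(x, y)})]
--             while stack:
--                 path, visited = stack.pop()
--                 if len(path) == buffer_size:
--                     coords, reward = _score(matrix, path, rewards)
--                     if reward > best_reward:
--                         best_path, best_reward = coords, reward
--                     continue
--                 tx, ty = path[-1]
--                 for dx, dy in ((-1, 0), (0, -1), (1, 0), (0, 1)):  # up, left, down, right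
--                     nx, ny = tx + dx, ty + dy
--                     if 0 <= nx < rows and 0 <= ny < cols and (nx, ny) not in visited:
--                         stack.append((path + [(nx, ny)], visited | {(nx, ny)}))
--     return best_path, best_reward
--
--
-- def _score(matrix, path, rewards):
--     values = [matrix[x][y] for x, y in path]
--     total = 0
--     coords = []
--     used = set()
--     for seq, weight in rewards.items():
--         n = len(seq)
--         for i in range(len(values) - n + 1):
--             if tuple(values[i:i+n]) == seq and all(c not in used for c in path[i:i+n]):
--                 total += weight
--                 coords += path[i:i+n]
--                 used |= set(path[i:i+n])
--     return coords, total
-- ===== Notes on version B (the rewrite author's own statement) =====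
-- stated objective: alternative
-- what changed: The recursive path generator that materializes the full list of paths is replaced by an explicit-stack DFS that scores each completed path on the fly (neighbours are pushed in reverse direction order, so paths are visited in the same order and the first-best tie-breaking is preserved).
import Mathlib
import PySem

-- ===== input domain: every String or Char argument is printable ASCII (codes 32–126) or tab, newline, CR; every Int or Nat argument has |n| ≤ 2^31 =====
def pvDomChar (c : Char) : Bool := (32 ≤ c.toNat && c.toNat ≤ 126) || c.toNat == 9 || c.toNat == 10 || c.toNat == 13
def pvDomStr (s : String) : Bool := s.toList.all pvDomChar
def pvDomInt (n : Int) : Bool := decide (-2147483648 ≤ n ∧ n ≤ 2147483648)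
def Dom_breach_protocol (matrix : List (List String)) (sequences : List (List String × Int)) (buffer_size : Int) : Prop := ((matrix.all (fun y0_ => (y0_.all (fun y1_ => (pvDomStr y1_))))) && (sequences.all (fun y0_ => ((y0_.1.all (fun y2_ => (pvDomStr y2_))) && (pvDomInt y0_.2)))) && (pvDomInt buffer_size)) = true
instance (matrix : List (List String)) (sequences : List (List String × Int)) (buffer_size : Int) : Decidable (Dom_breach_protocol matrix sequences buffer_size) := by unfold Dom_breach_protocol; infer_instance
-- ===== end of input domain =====

-- B replaces A's recursive path generator (which materializes the full list of paths before the
-- scoring loop) by an explicit-stack DFS that scores each completed path on the fly, in the same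
-- enumeration order; same results, no global path list (objective: alternative).


-- ===== PORT A =====

-- the in-bounds cells of the grid (used only in the termination measures of both ports' loops)
def bpCells (rows cols : Int) : List (Int × Int) :=
  (List.range rows.toNat).flatMap (fun i => (List.range cols.toNat).map (fun j => ((i : Int), (j : Int))))

-- number of in-bounds cells not yet visited (both loops terminate because it shrinks)
def bpFree (rows cols : Int) (vis : PySem.Set (Int × Int)) : Nat :=
  ((bpCells rows cols).filter (fun c => !(PySem.Set.contains vis c))).length

lemma bpMem_cells (rows cols : Int) (c : Int × Int)
    (h1 : 0 ≤ c.1) (h2 : c.1 < rows) (h3 : 0 ≤ c.2) (h4 : c.2 < cols) : c ∈ bpCells rows cols := by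
  rcases c with ⟨a, b⟩
  simp only [bpCells, List.mem_flatMap, List.mem_map]
  refine ⟨a, ?_, b, ?_, rfl⟩
  · simp
    exact ⟨a.toNat, by omega, by omega⟩
  · simp
    exact ⟨b.toNat, by omega, by omega⟩

-- visiting one more free in-bounds cell strictly decreases the measure
lemma bpFree_add_lt (rows cols : Int) (vis : PySem.Set (Int × Int)) (c : Int × Int)
    (h1 : 0 ≤ c.1) (h2 : c.1 < rows) (h3 : 0 ≤ c.2) (h4 : c.2 < cols)
    (h5 : PySem.Set.contains vis c = false) :
    bpFree rows cols (PySem.Set.add vis c) < bpFree rows cols vis := by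
  have hnotin : c ∉ vis := by
    intro h
    rw [(PySem.Set.contains_iff _ _).2 h] at h5
    cases h5
  have hsub : ((bpCells rows cols).filter (fun d => !(PySem.Set.contains (PySem.Set.add vis c) d))).Sublist
      ((bpCells rows cols).filter (fun d => !(PySem.Set.contains vis d))) := by
    apply List.monotone_filter_right
    intro d hd
    simp only [Bool.not_eq_eq_eq_not, Bool.not_true] at hd ⊢
    rcases h : PySem.Set.contains vis d with _ | _
    · rfl
    · exfalso
      have hdm : d ∈ PySem.Set.add vis c := (PySem.Set.mem_add _ _ _).2 (Or.inl ((PySem.Set.contains_iff _ _).1 h))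
      rw [(PySem.Set.contains_iff _ _).2 hdm] at hd
      cases hd
  have hcq : c ∈ (bpCells rows cols).filter (fun d => !(PySem.Set.contains vis d)) := by
    apply List.mem_filter.2
    refine ⟨bpMem_cells rows cols c h1 h2 h3 h4, ?_⟩
    simpa using hnotin
  have hcp : c ∉ (bpCells rows cols).filter (fun d => !(PySem.Set.contains (PySem.Set.add vis c) d)) := by
    intro hm
    have := (List.mem_filter.1 hm).2
    rw [(PySem.Set.contains_iff _ _).2 ((PySem.Set.mem_add _ _ _).2 (Or.inr rfl))] at this
    simp at this
  unfold bpFree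
  refine Nat.lt_of_le_of_ne hsub.length_le (fun heq => ?_)
  exact hcp (hsub.eq_of_length heq ▸ hcq)

mutual
-- generate_paths_from(matrix, buffer_size, x, y, visited)
def bpGenFrom (rows cols : Int) (b : Int) (x y : Int) (vis : PySem.Set (Int × Int)) :
    List (List (Int × Int)) :=
  if b == 1 then [[(x, y)]]
  else bpGenDirs rows cols b x y vis [((0 : Int), (1 : Int)), (1, 0), (0, -1), (-1, 0)] []
termination_by (bpFree rows cols vis, 5)
decreasing_by
  apply Prod.Lex.right
  simp

-- the 'for dx, dy in [...]' loop of generate_paths_from, accumulating 'paths'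
def bpGenDirs (rows cols : Int) (b : Int) (x y : Int) (vis : PySem.Set (Int × Int)) :
    List (Int × Int) → List (List (Int × Int)) → List (List (Int × Int))
  | [], paths => paths
  | d :: ds, paths =>
    let nx := x + d.1
    let ny := y + d.2
    if h : 0 ≤ nx ∧ nx < rows ∧ 0 ≤ ny ∧ ny < cols ∧ PySem.Set.contains vis (nx, ny) = false then
      bpGenDirs rows cols b x y vis ds
        (paths ++ (bpGenFrom rows cols (b - 1) nx ny (PySem.Set.add vis (nx, ny))).map
          (fun p => (x, y) :: p))
    else
      bpGenDirs rows cols b x y vis ds paths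
termination_by ds _ => (bpFree rows cols vis, ds.length)
decreasing_by
  · exact Prod.Lex.left _ _ (bpFree_add_lt rows cols vis (x + d.1, y + d.2) h.1 h.2.1 h.2.2.1 h.2.2.2.1 h.2.2.2.2)
  · apply Prod.Lex.right
    simp
  · apply Prod.Lex.right
    simp
end

-- generate_paths(matrix, buffer_size)
def bpGeneratePaths (matrix : List (List String)) (b : Int) : List (List (Int × Int)) :=
  (PySem.List.pyRange 0 (PySem.List.len matrix) 1).foldl
    (fun paths x =>
      (PySem.List.pyRange 0 (PySem.List.len (PySem.List.pyGetD matrix 0 [])) 1).foldl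
        (fun paths y =>
          paths ++ bpGenFrom (PySem.List.len matrix) (PySem.List.len (PySem.List.pyGetD matrix 0 []))
            b x y (PySem.Set.ofList [(x, y)]))
        paths)
    []

-- the body of A's 'for path in paths' loop: score the path, keep it if strictly better
def bpConsiderA (matrix : List (List String)) (rewards : PySem.Dict (List String) Int)
    (best : List (Int × Int) × Int) (path : List (Int × Int)) : List (Int × Int) × Int :=
  let buffer : List String :=
    path.map (fun c => PySem.List.pyGetD (PySem.List.pyGetD matrix c.1 []) c.2 "")
  let st :=
    rewards.items.foldl
      (fun (st : Int × List (Int × Int) × PySem.Set (Int × Int)) sw =>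
        (PySem.List.pyRange 0 (PySem.List.len buffer - PySem.List.len sw.1 + 1) 1).foldl
          (fun st i =>
            if (PySem.List.slice buffer (some i) (some (i + PySem.List.len sw.1)) == sw.1)
                && (PySem.List.slice path (some i) (some (i + PySem.List.len sw.1))).all
                     (fun c => !(PySem.Set.contains st.2.2 c)) then
              (st.1 + sw.2,
               st.2.1 ++ PySem.List.slice path (some i) (some (i + PySem.List.len sw.1)),
               PySem.Set.update st.2.2 (PySem.List.slice path (some i) (some (i + PySem.List.len sw.1))))
            else st)
          st)
      (0, [], PySem.Set.empty)
  if st.1 > best.2 then (st.2.1, st.1) else best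

def breach_protocol (matrix : List (List String)) (sequences : List (List String × Int))
    (buffer_size : Int) : (List (Int × Int)) × Int :=
  let rewards : PySem.Dict (List String) Int :=
    sequences.foldl (fun d sw => d.insert sw.1 sw.2) PySem.Dict.empty
  let paths := bpGeneratePaths matrix buffer_size
  paths.foldl (bpConsiderA matrix rewards) ([], 0)

-- ===== PORT B =====

-- _score(matrix, path, rewards) of Source B
def bpScore (matrix : List (List String)) (path : List (Int × Int))
    (rewards : PySem.Dict (List String) Int) : List (Int × Int) × Int :=
  let values : List String :=
    path.map (fun c => PySem.List.pyGetD (PySem.List.pyGetD matrix c.1 []) c.2 "")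
  let st :=
    rewards.items.foldl
      (fun (st : Int × List (Int × Int) × PySem.Set (Int × Int)) sw =>
        (PySem.List.pyRange 0 (PySem.List.len values - PySem.List.len sw.1 + 1) 1).foldl
          (fun st i =>
            let hit := PySem.List.slice path (some i) (some (i + PySem.List.len sw.1))
            if (PySem.List.slice values (some i) (some (i + PySem.List.len sw.1)) == sw.1)
                && hit.all (fun c => !(PySem.Set.contains st.2.2 c)) then
              (st.1 + sw.2, st.2.1 ++ hit, PySem.Set.update st.2.2 hit)
            else st)
          st)
      (0, [], PySem.Set.empty)
  (st.2.1, st.1)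

-- one step of Source B's push loop over the reversed direction list (python appends to the list's
-- end and pops from the end; the Lean stack keeps its head as python's end, so append is cons)
def bpPush (rows cols : Int) (vis : PySem.Set (Int × Int)) (path : List (Int × Int)) (t : Int × Int)
    (st : List (List (Int × Int) × PySem.Set (Int × Int))) (d : Int × Int) :
    List (List (Int × Int) × PySem.Set (Int × Int)) :=
  let nx := t.1 + d.1
  let ny := t.2 + d.2
  if 0 ≤ nx ∧ nx < rows ∧ 0 ≤ ny ∧ ny < cols ∧ PySem.Set.contains vis (nx, ny) = false then
    (path ++ [(nx, ny)], PySem.Set.add vis (nx, ny)) :: st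
  else st

-- termination measure of the while-stack loop
def bpStackM (rows cols : Int) (stack : List (List (Int × Int) × PySem.Set (Int × Int))) : Nat :=
  (stack.map (fun f => 5 ^ bpFree rows cols f.2)).sum

lemma bpStackM_push_le (rows cols : Int) (vis : PySem.Set (Int × Int)) (path : List (Int × Int))
    (t : Int × Int) (rest : List (List (Int × Int) × PySem.Set (Int × Int))) (d : Int × Int) :
    bpStackM rows cols (bpPush rows cols vis path t rest d)
      ≤ bpStackM rows cols rest + 5 ^ (bpFree rows cols vis - 1) := by
  dsimp only [bpPush]
  split_ifs with hg
  · simp only [bpStackM, List.map_cons, List.sum_cons]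
    have hlt := bpFree_add_lt rows cols vis (t.1 + d.1, t.2 + d.2) hg.1 hg.2.1 hg.2.2.1 hg.2.2.2.1 hg.2.2.2.2
    have : 5 ^ bpFree rows cols (PySem.Set.add vis (t.1 + d.1, t.2 + d.2)) ≤ 5 ^ (bpFree rows cols vis - 1) :=
      Nat.pow_le_pow_right (by omega) (by omega)
    omega
  · exact Nat.le_add_right _ _

lemma bpFoldPush_le (rows cols : Int) (vis : PySem.Set (Int × Int)) (path : List (Int × Int))
    (t : Int × Int) (ds : List (Int × Int)) :
    ∀ rest, bpStackM rows cols (ds.foldl (bpPush rows cols vis path t) rest)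
      ≤ bpStackM rows cols rest + ds.length * 5 ^ (bpFree rows cols vis - 1) := by
  induction ds with
  | nil => intro rest; simp
  | cons d ds ih =>
    intro rest
    have h1 := ih (bpPush rows cols vis path t rest d)
    have h2 := bpStackM_push_le rows cols vis path t rest d
    simp only [List.foldl_cons, List.length_cons]
    have : (ds.length + 1) * 5 ^ (bpFree rows cols vis - 1)
        = ds.length * 5 ^ (bpFree rows cols vis - 1) + 5 ^ (bpFree rows cols vis - 1) := by ring
    omega

lemma bpPush_lt (rows cols : Int) (vis : PySem.Set (Int × Int)) (path : List (Int × Int))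
    (t : Int × Int) (rest : List (List (Int × Int) × PySem.Set (Int × Int))) :
    bpStackM rows cols
        ([((-1 : Int), (0 : Int)), (0, -1), (1, 0), (0, 1)].foldl (bpPush rows cols vis path t) rest)
      < 5 ^ bpFree rows cols vis + bpStackM rows cols rest := by
  rcases hf : bpFree rows cols vis with _ | n
  · have hpush : ∀ st d, bpPush rows cols vis path t st d = st := by
      intro st d
      dsimp only [bpPush]
      rw [if_neg]
      intro hg
      have := bpFree_add_lt rows cols vis (t.1 + d.1, t.2 + d.2) hg.1 hg.2.1 hg.2.2.1 hg.2.2.2.1 hg.2.2.2.2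
      omega
    simp [hpush]
  · have h := bpFoldPush_le rows cols vis path t [((-1 : Int), (0 : Int)), (0, -1), (1, 0), (0, 1)] rest
    rw [hf] at h
    simp only [List.length_cons, List.length_nil, Nat.add_sub_cancel] at h
    have : 5 ^ (n + 1) = 5 * 5 ^ n := by rw [Nat.pow_succ]; ring
    have hc : 0 < 5 ^ n := Nat.pow_pos (by omega)
    omega

-- the while-stack loop of Source B
def bpLoop (matrix : List (List String)) (rows cols : Int) (rewards : PySem.Dict (List String) Int)
    (bsize : Int) (stack : List (List (Int × Int) × PySem.Set (Int × Int)))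
    (best : List (Int × Int) × Int) : List (Int × Int) × Int :=
  match stack with
  | [] => best
  | (path, vis) :: rest =>
    if PySem.List.len path == bsize then
      let cr := bpScore matrix path rewards
      bpLoop matrix rows cols rewards bsize rest (if cr.2 > best.2 then (cr.1, cr.2) else best)
    else
      bpLoop matrix rows cols rewards bsize
        ([((-1 : Int), (0 : Int)), (0, -1), (1, 0), (0, 1)].foldl
          (bpPush rows cols vis path (PySem.List.pyGetD path (-1) (0, 0))) rest)
        best
termination_by bpStackM rows cols stack
decreasing_by
  · simp only [bpStackM, List.map_cons, List.sum_cons]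
    have := Nat.pow_pos (n := bpFree rows cols vis) (a := 5) (by omega)
    omega
  · exact bpPush_lt rows cols vis path _ rest

def breach_protocol_alt (matrix : List (List String)) (sequences : List (List String × Int))
    (buffer_size : Int) : (List (Int × Int)) × Int :=
  let rows := PySem.List.len matrix
  let cols : Int := match matrix with
    | [] => 0
    | r :: _ => PySem.List.len r
  let rewards : PySem.Dict (List String) Int :=
    sequences.foldl (fun d sw => d.insert sw.1 sw.2) PySem.Dict.empty
  (PySem.List.pyRange 0 rows 1).foldl
    (fun best x =>
      (PySem.List.pyRange 0 cols 1).foldl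
        (fun best y =>
          bpLoop matrix rows cols rewards buffer_size [([(x, y)], PySem.Set.ofList [(x, y)])] best)
        best)
    ([], 0)

-- ===== PRECONDITION & SPEC =====

-- Pre_ excludes exactly the ragged matrices on which the Python A raises IndexError: a row shorter
-- than row 0 is indexed by some enumerated path whenever any full-length path is materialized at
-- all, i.e. unless buffer_size ≤ 0 or buffer_size exceeds the number of grid cells.
def Pre_breach_protocol (matrix : List (List String)) (sequences : List (List String × Int))
    (buffer_size : Int) : Prop :=
  (∀ row ∈ matrix, (matrix.headD []).length ≤ row.length) ∨ buffer_size ≤ 0 ∨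
    ((matrix.length : Int) * ((matrix.headD []).length : Int) < buffer_size)

instance (matrix : List (List String)) (sequences : List (List String × Int)) (buffer_size : Int) :
    Decidable (Pre_breach_protocol matrix sequences buffer_size) := by
  unfold Pre_breach_protocol; infer_instance

def pvWitness_breach_protocol : List (List String) × (List (List String × Int)) × Int :=
  ([["a", "b"]], [(["a"], 5)], 2)

def Spec_breach_protocol (matrix : List (List String)) (sequences : List (List String × Int)) (buffer_size : Int) (out : (List (Int × Int)) × Int) : Prop := out = breach_protocol_alt matrix sequences buffer_size
instance (matrix : List (List String)) (sequences : List (List String × Int)) (buffer_size : Int) (out : (List (Int × Int)) × Int) : Decidable (Spec_breach_protocol matrix sequences buffer_size out) := by unfold Spec_breach_protocol; infer_instance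

-- ===== CLAIM (what is proved, stated in full; the proofs are below) =====
def Claim_equal_breach_protocol : Prop := ∀ (matrix : List (List String)) (sequences : List (List String × Int)) (buffer_size : Int), Dom_breach_protocol matrix sequences buffer_size → Pre_breach_protocol matrix sequences buffer_size → Spec_breach_protocol matrix sequences buffer_size (breach_protocol matrix sequences buffer_size)

-- ===== LEMMAS AND PROOFS =====

-- A's per-path update and B's score-then-compare update are the same computation
lemma bpConsiderA_eq (matrix : List (List String)) (rewards : PySem.Dict (List String) Int)
    (best : List (Int × Int) × Int) (path : List (Int × Int)) :
    bpConsiderA matrix rewards best path =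
      (if (bpScore matrix path rewards).2 > best.2
       then ((bpScore matrix path rewards).1, (bpScore matrix path rewards).2) else best) := by
  rfl


-- the frames that Source B's push loop adds for one popped frame, in pop order
def bpFrames (rows cols : Int) (vis : PySem.Set (Int × Int)) (path : List (Int × Int)) (x y : Int)
    (ds : List (Int × Int)) : List (List (Int × Int) × PySem.Set (Int × Int)) :=
  ds.filterMap (fun d =>
    if 0 ≤ x + d.1 ∧ x + d.1 < rows ∧ 0 ≤ y + d.2 ∧ y + d.2 < cols ∧
        PySem.Set.contains vis (x + d.1, y + d.2) = false then
      some (path ++ [(x + d.1, y + d.2)], PySem.Set.add vis (x + d.1, y + d.2))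
    else none)

-- the per-direction blocks of paths produced by A's generator, in the same order
def bpBlocks (rows cols b x y : Int) (vis : PySem.Set (Int × Int)) (ds : List (Int × Int)) :
    List (List (Int × Int)) :=
  ds.flatMap (fun d =>
    if 0 ≤ x + d.1 ∧ x + d.1 < rows ∧ 0 ≤ y + d.2 ∧ y + d.2 < cols ∧
        PySem.Set.contains vis (x + d.1, y + d.2) = false then
      (bpGenFrom rows cols (b - 1) (x + d.1) (y + d.2) (PySem.Set.add vis (x + d.1, y + d.2))).map
        (fun p => (x, y) :: p)
    else [])

lemma bpFoldPush_eq_frames (rows cols : Int) (vis : PySem.Set (Int × Int))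
    (path : List (Int × Int)) (x y : Int) :
    ∀ (ds : List (Int × Int)) (rest : List (List (Int × Int) × PySem.Set (Int × Int))),
      ds.reverse.foldl (bpPush rows cols vis path (x, y)) rest
        = bpFrames rows cols vis path x y ds ++ rest := by
  intro ds
  induction ds with
  | nil => intro rest; rfl
  | cons d ds ih =>
    intro rest
    rw [List.reverse_cons, List.foldl_append, ih rest]
    show bpPush rows cols vis path (x, y) (bpFrames rows cols vis path x y ds ++ rest) d = _
    dsimp only [bpPush, bpFrames, List.filterMap_cons]
    split_ifs with hg
    · simp
    · simp

lemma bpGenDirs_eq_blocks (rows cols : Int) (b x y : Int) (vis : PySem.Set (Int × Int)) :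
    ∀ (ds : List (Int × Int)) (acc : List (List (Int × Int))),
      bpGenDirs rows cols b x y vis ds acc = acc ++ bpBlocks rows cols b x y vis ds := by
  intro ds
  induction ds with
  | nil => intro acc; simp [bpGenDirs, bpBlocks]
  | cons d ds ih =>
    intro acc
    rw [bpGenDirs]
    split_ifs with hg
    · rw [ih]
      show (acc ++ _) ++ _ = acc ++ bpBlocks rows cols b x y vis (d :: ds)
      unfold bpBlocks
      rw [List.flatMap_cons, if_pos hg, List.append_assoc]
    · rw [ih]
      show acc ++ _ = acc ++ bpBlocks rows cols b x y vis (d :: ds)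
      unfold bpBlocks
      rw [List.flatMap_cons, if_neg hg, List.nil_append]

-- folding over a flatMap is the nested fold
lemma bpFoldl_flatMap {α β γ : Type} (f : β → α → β) (g : γ → List α) :
    ∀ (L : List γ) (init : β),
      (L.flatMap g).foldl f init = L.foldl (fun acc s => (g s).foldl f acc) init := by
  intro L
  induction L with
  | nil => intro init; rfl
  | cons s L ih =>
    intro init
    rw [List.flatMap_cons, List.foldl_append, List.foldl_cons, ih]

-- one unfolding step of the stack loop, assuming the claim for every smaller visited-measure
lemma bpLoop_step (matrix : List (List String)) (rows cols : Int)
    (rewards : PySem.Dict (List String) Int) (bsize : Int) (vis : PySem.Set (Int × Int))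
    (hIH : ∀ (vis' : PySem.Set (Int × Int)), bpFree rows cols vis' < bpFree rows cols vis →
      ∀ (x y : Int) (pre : List (Int × Int))
        (rest : List (List (Int × Int) × PySem.Set (Int × Int))) (best : List (Int × Int) × Int),
        bpLoop matrix rows cols rewards bsize ((pre ++ [(x, y)], vis') :: rest) best
          = bpLoop matrix rows cols rewards bsize rest
              (((bpGenFrom rows cols (bsize - (pre.length : Int)) x y vis').map
                  (fun p => pre ++ p)).foldl (bpConsiderA matrix rewards) best)) :
    ∀ (x y : Int) (pre : List (Int × Int))
      (rest : List (List (Int × Int) × PySem.Set (Int × Int))) (best : List (Int × Int) × Int),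
      bpLoop matrix rows cols rewards bsize ((pre ++ [(x, y)], vis) :: rest) best
        = bpLoop matrix rows cols rewards bsize rest
            (((bpGenFrom rows cols (bsize - (pre.length : Int)) x y vis).map
                (fun p => pre ++ p)).foldl (bpConsiderA matrix rewards) best) := by
  intro x y pre rest best
  rw [bpLoop]
  rw [bpGenFrom]
  by_cases hb : bsize = (pre.length : Int) + 1
  · rw [if_pos (by simp [PySem.List.len_eq]; omega)]
    rw [if_pos (by subst hb; simp)]
    rw [List.map_cons, List.map_nil, List.foldl_cons, List.foldl_nil, bpConsiderA_eq]
  · rw [if_neg (by simp [PySem.List.len_eq]; omega)]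
    rw [if_neg (by simp; omega)]
    rw [PySem.List.pyGetD_neg_one_append_singleton]
    have hrev : ([((-1 : Int), (0 : Int)), (0, -1), (1, 0), (0, 1)] : List (Int × Int))
        = ([((0 : Int), (1 : Int)), (1, 0), (0, -1), (-1, 0)] : List (Int × Int)).reverse := rfl
    rw [hrev, bpFoldPush_eq_frames, bpGenDirs_eq_blocks, List.nil_append]
    -- inner induction over the direction list
    have key : ∀ (ds : List (Int × Int)) (rest : List (List (Int × Int) × PySem.Set (Int × Int)))
        (best : List (Int × Int) × Int),
        bpLoop matrix rows cols rewards bsize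
            (bpFrames rows cols vis (pre ++ [(x, y)]) x y ds ++ rest) best
          = bpLoop matrix rows cols rewards bsize rest
              (((bpBlocks rows cols (bsize - (pre.length : Int)) x y vis ds).map
                  (fun p => pre ++ p)).foldl (bpConsiderA matrix rewards) best) := by
      intro ds
      induction ds with
      | nil => intro rest best; rfl
      | cons d ds ih =>
        intro rest best
        have hfr : bpFrames rows cols vis (pre ++ [(x, y)]) x y (d :: ds)
            = (if 0 ≤ x + d.1 ∧ x + d.1 < rows ∧ 0 ≤ y + d.2 ∧ y + d.2 < cols ∧
                  PySem.Set.contains vis (x + d.1, y + d.2) = false then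
                [((pre ++ [(x, y)]) ++ [(x + d.1, y + d.2)], PySem.Set.add vis (x + d.1, y + d.2))]
              else []) ++ bpFrames rows cols vis (pre ++ [(x, y)]) x y ds := by
          unfold bpFrames
          rw [List.filterMap_cons]
          split_ifs <;> simp
        have hbl : bpBlocks rows cols (bsize - (pre.length : Int)) x y vis (d :: ds)
            = (if 0 ≤ x + d.1 ∧ x + d.1 < rows ∧ 0 ≤ y + d.2 ∧ y + d.2 < cols ∧
                  PySem.Set.contains vis (x + d.1, y + d.2) = false then
                (bpGenFrom rows cols (bsize - (pre.length : Int) - 1) (x + d.1) (y + d.2)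
                  (PySem.Set.add vis (x + d.1, y + d.2))).map (fun p => (x, y) :: p)
              else []) ++ bpBlocks rows cols (bsize - (pre.length : Int)) x y vis ds := by
          unfold bpBlocks
          rw [List.flatMap_cons]
        rw [hfr, hbl]
        by_cases hg : 0 ≤ x + d.1 ∧ x + d.1 < rows ∧ 0 ≤ y + d.2 ∧ y + d.2 < cols ∧
            PySem.Set.contains vis (x + d.1, y + d.2) = false
        · rw [if_pos hg, if_pos hg, List.singleton_append]
          have hlt := bpFree_add_lt rows cols vis (x + d.1, y + d.2)
            hg.1 hg.2.1 hg.2.2.1 hg.2.2.2.1 hg.2.2.2.2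
          have h1 := hIH (PySem.Set.add vis (x + d.1, y + d.2)) hlt (x + d.1) (y + d.2)
            (pre ++ [(x, y)])
            (bpFrames rows cols vis (pre ++ [(x, y)]) x y ds ++ rest) best
          have hlen : bsize - (((pre ++ [(x, y)]).length : Int))
              = bsize - (pre.length : Int) - 1 := by simp; omega
          rw [hlen] at h1
          rw [List.cons_append, h1, ih]
          rw [List.map_append, List.foldl_append, List.map_map]
          congr 2
          congr 1
          apply List.map_congr_left
          intro p _
          simp
        · rw [if_neg hg, if_neg hg, List.nil_append, List.nil_append]
          exact ih rest best
    rw [key]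

-- the claim of bpLoop_step, for every visited set, by strong induction on the measure
lemma bpLoop_cons (matrix : List (List String)) (rows cols : Int)
    (rewards : PySem.Dict (List String) Int) (bsize : Int) :
    ∀ (n : Nat) (vis : PySem.Set (Int × Int)), bpFree rows cols vis ≤ n →
      ∀ (x y : Int) (pre : List (Int × Int))
        (rest : List (List (Int × Int) × PySem.Set (Int × Int))) (best : List (Int × Int) × Int),
        bpLoop matrix rows cols rewards bsize ((pre ++ [(x, y)], vis) :: rest) best
          = bpLoop matrix rows cols rewards bsize rest
              (((bpGenFrom rows cols (bsize - (pre.length : Int)) x y vis).map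
                  (fun p => pre ++ p)).foldl (bpConsiderA matrix rewards) best) := by
  intro n
  induction n with
  | zero =>
    intro vis hn
    exact bpLoop_step matrix rows cols rewards bsize vis
      (fun vis' hlt => absurd hlt (by omega))
  | succ n ih =>
    intro vis hn
    exact bpLoop_step matrix rows cols rewards bsize vis
      (fun vis' hlt => ih vis' (by omega))

-- running the stack loop on one start frame folds A's generated paths in order
lemma bpLoop_single (matrix : List (List String)) (rows cols : Int)
    (rewards : PySem.Dict (List String) Int) (bsize : Int) (x y : Int)
    (best : List (Int × Int) × Int) :
    bpLoop matrix rows cols rewards bsize [([(x, y)], PySem.Set.ofList [(x, y)])] best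
      = (bpGenFrom rows cols bsize x y (PySem.Set.ofList [(x, y)])).foldl
          (bpConsiderA matrix rewards) best := by
  have h := bpLoop_cons matrix rows cols rewards bsize _ (PySem.Set.ofList [(x, y)]) le_rfl
    x y [] [] best
  simp only [List.nil_append] at h
  rw [h, bpLoop]
  simp

-- the double start loop of B equals A's fold over the accumulated path list
lemma bpMain (matrix : List (List String)) (rewards : PySem.Dict (List String) Int)
    (bsize R C : Int) :
    ((PySem.List.pyRange 0 R 1).foldl
        (fun paths x =>
          (PySem.List.pyRange 0 C 1).foldl
            (fun paths y => paths ++ bpGenFrom R C bsize x y (PySem.Set.ofList [(x, y)])) paths)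
        []).foldl (bpConsiderA matrix rewards) ([], 0)
      = (PySem.List.pyRange 0 R 1).foldl
          (fun best x =>
            (PySem.List.pyRange 0 C 1).foldl
              (fun best y =>
                bpLoop matrix R C rewards bsize [([(x, y)], PySem.Set.ofList [(x, y)])] best)
              best)
          ([], 0) := by
  have hpaths : (PySem.List.pyRange 0 R 1).foldl
      (fun paths x =>
        (PySem.List.pyRange 0 C 1).foldl
          (fun paths y => paths ++ bpGenFrom R C bsize x y (PySem.Set.ofList [(x, y)])) paths)
      []
      = (PySem.List.pyRange 0 R 1).flatMap
          (fun x => (PySem.List.pyRange 0 C 1).flatMap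
            (fun y => bpGenFrom R C bsize x y (PySem.Set.ofList [(x, y)]))) := by
    have h1 : (PySem.List.pyRange 0 R 1).foldl
        (fun paths x =>
          (PySem.List.pyRange 0 C 1).foldl
            (fun paths y => paths ++ bpGenFrom R C bsize x y (PySem.Set.ofList [(x, y)])) paths)
        []
        = (PySem.List.pyRange 0 R 1).foldl
            (fun paths x => paths ++ (PySem.List.pyRange 0 C 1).flatMap
              (fun y => bpGenFrom R C bsize x y (PySem.Set.ofList [(x, y)]))) [] := by
      apply PySem.List.foldl_congr_mem
      intro acc x hx
      rw [PySem.List.foldl_append_eq_flatMap]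
    rw [h1, PySem.List.foldl_append_eq_flatMap, List.nil_append]
  rw [hpaths, bpFoldl_flatMap]
  have hfun : (fun (acc : List (Int × Int) × Int) (x : Int) =>
        ((PySem.List.pyRange 0 C 1).flatMap
          (fun y => bpGenFrom R C bsize x y (PySem.Set.ofList [(x, y)]))).foldl
          (bpConsiderA matrix rewards) acc)
      = (fun best x =>
          (PySem.List.pyRange 0 C 1).foldl
            (fun best y =>
              bpLoop matrix R C rewards bsize [([(x, y)], PySem.Set.ofList [(x, y)])] best)
            best) := by
    funext acc x
    rw [bpFoldl_flatMap]
    have hin : (fun (acc : List (Int × Int) × Int) (y : Int) =>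
          (bpGenFrom R C bsize x y (PySem.Set.ofList [(x, y)])).foldl
            (bpConsiderA matrix rewards) acc)
        = (fun best y =>
            bpLoop matrix R C rewards bsize [([(x, y)], PySem.Set.ofList [(x, y)])] best) := by
      funext acc y
      rw [bpLoop_single]
    rw [hin]
  rw [hfun]

-- ===== VERDICT (by name: the statement is the Claim_ definition above) =====
theorem breach_protocol_spec : Claim_equal_breach_protocol := by
  intro matrix sequences buffer_size hdom hpre
  unfold Spec_breach_protocol breach_protocol breach_protocol_alt bpGeneratePaths
  cases matrix with
  | nil => rfl
  | cons r rs =>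
    simp only [PySem.List.pyGetD_zero_cons]
    exact bpMain (r :: rs) _ buffer_size (PySem.List.len (r :: rs)) (PySem.List.len r)
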